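-- pv_equiv track=rewrite | github.com/vertuer/ymjh | config_ark.py | get_guanqia
-- ===== SOURCE A (Python) =====
-- def ChapterETC(chapter):
--     _mapping_keys = {'ZX':'主线','WZ':'物资筹备','PR':'芯片获取','JM':'剿灭作战','HD':'活动'}
--     # mapping_keys = {'1':'第一章','2':'第二章','3':'第三章','4':'第四章','5':'第五章',
--     #               'LS':'经验本','AP':'红票子','CE':'龙门币','SK':'建材','HD':'活动'}
--     return _mapping_keys[chapter]
--
-- def get_guanqia(guanqia_pic,pic_huodong):
--     """
--     guanqia_pic: path infor of guanqia
--     pic_huodong: path infor of huodong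
--     return guanqia_dict: the mix of guanqia & huodong(without XXX_confirm etc.)
--     """
--     tmp1 = list(guanqia_pic.keys())
--     tmp2 = list(pic_huodong.keys())
--     tmp_guanqia = tmp1 + tmp2
--     index = 0
--     for i in range(len(tmp_guanqia)):
--         tmp_str = tmp_guanqia[index]
--         if "|" in tmp_str:
--             if "1-11" in tmp_str or "_confirm" in tmp_str:
--                 tmp_guanqia.remove(tmp_str)
--                 index -= 1
--         else:
--             tmp_guanqia.remove(tmp_str)
--             index -= 1
--         index += 1
--
--     guanqia_dict = {'主线': {}, '物资筹备': {}, '芯片获取': {}, '剿灭作战': {}, '活动': {}}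
--     for i in tmp_guanqia:
--         tmp_split = i.split('|')
--         total_class = tmp_split[0]
--         map_total_class = ChapterETC(total_class)
--         chapter = tmp_split[1]
--         if len(tmp_split)==3:
--             name = tmp_split[2]
--         if chapter in guanqia_dict[map_total_class]:
--             if len(tmp_split)==2:
--                 #章节
--                 pass
--             else:
--                 guanqia_dict[map_total_class][chapter].append(name)
--         else:
--             if len(tmp_split)==2:
--                 #章节
--                 guanqia_dict[map_total_class][chapter] = []
--             else:
--                 guanqia_dict[map_total_class][chapter] = [name]
--     return guanqia_dict
-- ===== SOURCE B (Python) =====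
-- def get_guanqia(guanqia_pic, pic_huodong):
--     """Single fused pass: inline guard instead of A's remove()-based filter loop."""
--     mapping = {'ZX': '主线', 'WZ': '物资筹备', 'PR': '芯片获取', 'JM': '剿灭作战', 'HD': '活动'}
--     result = {v: {} for v in mapping.values()}
--     for key in list(guanqia_pic) + list(pic_huodong):
--         if '|' not in key or '1-11' in key or '_confirm' in key:
--             continue
--         parts = key.split('|')
--         bucket = result[mapping[parts[0]]]
--         if len(parts) == 2:
--             bucket.setdefault(parts[1], [])
--         else:
--             _category, chapter, name = parts
--             if chapter in bucket:
--                 bucket[chapter].append(name)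
--             else:
--                 bucket[chapter] = [name]
--     return result
-- ===== Notes on version B (the rewrite author's own statement) =====
-- stated objective: faster
-- what changed: B replaces A's two sequential passes (a quadratic filter loop that mutates the list with remove() plus index bookkeeping, then a bucketing loop with a stale 'name' variable) by one single pass over the keys with an inline skip-guard and no intermediate list, unpacking each surviving key directly.
import Mathlib
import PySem

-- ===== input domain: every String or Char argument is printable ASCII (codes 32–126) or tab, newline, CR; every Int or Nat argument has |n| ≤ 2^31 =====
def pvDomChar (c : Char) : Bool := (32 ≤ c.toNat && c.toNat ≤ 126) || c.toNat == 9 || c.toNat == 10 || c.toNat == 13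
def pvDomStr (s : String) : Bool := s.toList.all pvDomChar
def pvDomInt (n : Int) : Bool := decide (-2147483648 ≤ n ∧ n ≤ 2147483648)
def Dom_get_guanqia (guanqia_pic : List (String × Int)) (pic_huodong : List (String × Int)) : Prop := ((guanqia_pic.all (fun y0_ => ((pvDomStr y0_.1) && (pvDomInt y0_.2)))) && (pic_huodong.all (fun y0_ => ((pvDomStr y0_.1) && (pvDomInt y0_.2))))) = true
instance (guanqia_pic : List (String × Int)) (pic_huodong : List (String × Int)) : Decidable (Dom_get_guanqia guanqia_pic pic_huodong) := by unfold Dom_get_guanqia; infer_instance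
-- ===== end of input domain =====

-- B fuses A's two passes (remove()-based filter loop, then bucketing loop) into one guarded
-- pass without the intermediate list; objective: faster (A's remove() rescans make it quadratic).

-- ===== PORT A =====
-- the _mapping_keys dict of ChapterETC (shared literal)
def pvMapping : PySem.Dict String String :=
  PySem.Dict.ofList [("ZX", "主线"), ("WZ", "物资筹备"), ("PR", "芯片获取"), ("JM", "剿灭作战"), ("HD", "活动")]

-- ChapterETC: none = Python KeyError (excluded by Pre_)
def ChapterETC (chapter : String) : Option String := PySem.Dict.get? pvMapping chapter

-- A's first loop: `for i in range(len(tmp_guanqia))` with in-place remove() and index bookkeeping;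
-- fuel = the original length.  pyGet? none / remove? none are unreachable (proved in the lemmas below):
-- the index is always in range and tmp_str is a member, so the `.getD` defaults are never taken.
def pvFilterLoop : Nat → List String → Int → List String
  | 0, lst, _ => lst
  | n + 1, lst, index =>
    let tmp_str := (PySem.List.pyGet? lst index).getD ""
    if PySem.Str.isIn "|" tmp_str then
      if PySem.Str.isIn "1-11" tmp_str || PySem.Str.isIn "_confirm" tmp_str then
        pvFilterLoop n ((PySem.List.remove? lst tmp_str).getD lst) (index - 1 + 1)
      else
        pvFilterLoop n lst (index + 1)
    else
      pvFilterLoop n ((PySem.List.remove? lst tmp_str).getD lst) (index - 1 + 1)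

-- guanqia_dict literal of A
def pvInitA : PySem.Dict String (PySem.Dict String (List String)) :=
  PySem.Dict.ofList [("主线", PySem.Dict.empty), ("物资筹备", PySem.Dict.empty),
    ("芯片获取", PySem.Dict.empty), ("剿灭作战", PySem.Dict.empty), ("活动", PySem.Dict.empty)]

-- A's second loop; the Option String is Python's `name` variable (none = not yet assigned;
-- `.getD ""` there is Python's NameError, excluded by Pre_).  guanqia_dict[map_total_class]
-- is ported as get? ... getD empty: under Pre_ the key is always present.
def pvLoopA : List String → PySem.Dict String (PySem.Dict String (List String)) → Option String →
    PySem.Dict String (PySem.Dict String (List String))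
  | [], d, _ => d
  | i :: rest, d, name =>
    let tmp_split := (PySem.Str.split? i "|").getD []
    let total_class := (PySem.List.pyGet? tmp_split 0).getD ""   -- split? is some (sep ≠ ""); split is never empty
    match ChapterETC total_class with
    | none => d                                                   -- Python: KeyError aborts (outside Pre_)
    | some map_total_class =>
      let chapter := (PySem.List.pyGet? tmp_split 1).getD ""      -- "|" ∈ i, so length ≥ 2
      let name' := if tmp_split.length == 3 then PySem.List.pyGet? tmp_split 2 else name
      let bucket := (PySem.Dict.get? d map_total_class).getD PySem.Dict.empty
      if PySem.Dict.contains bucket chapter then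
        if tmp_split.length == 2 then
          pvLoopA rest d name'
        else
          pvLoopA rest (PySem.Dict.insert d map_total_class
            (PySem.Dict.modify bucket chapter [] (fun l => l ++ [name'.getD ""]))) name'
      else
        if tmp_split.length == 2 then
          pvLoopA rest (PySem.Dict.insert d map_total_class
            (PySem.Dict.insert bucket chapter [])) name'
        else
          pvLoopA rest (PySem.Dict.insert d map_total_class
            (PySem.Dict.insert bucket chapter [name'.getD ""])) name'

def get_guanqia (guanqia_pic : List (String × Int)) (pic_huodong : List (String × Int)) : List (String × List (String × List String)) :=
  let tmp1 := (PySem.Dict.ofList guanqia_pic).keys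
  let tmp2 := (PySem.Dict.ofList pic_huodong).keys
  let tmp_guanqia := tmp1 ++ tmp2
  let filtered := pvFilterLoop tmp_guanqia.length tmp_guanqia 0
  (pvLoopA filtered pvInitA none).items.map (fun p => (p.1, p.2.items))

-- ===== PORT B =====
-- one step of B's single fused loop (the `continue` guard, then split / bucket / unpack)
def pvStepB (d : PySem.Dict String (PySem.Dict String (List String))) (key : String) :
    PySem.Dict String (PySem.Dict String (List String)) :=
  if !(PySem.Str.isIn "|" key) || PySem.Str.isIn "1-11" key || PySem.Str.isIn "_confirm" key then d
  else
    let parts := (PySem.Str.split? key "|").getD []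
    match PySem.Dict.get? pvMapping ((PySem.List.pyGet? parts 0).getD "") with
    | none => d                                                     -- Python: KeyError (outside Pre_)
    | some cat =>
      let bucket := (PySem.Dict.get? d cat).getD PySem.Dict.empty   -- result[...]: key always present
      if parts.length == 2 then
        PySem.Dict.insert d cat
          (PySem.Dict.setdefault bucket ((PySem.List.pyGet? parts 1).getD "") [])
      else
        match parts with
        | [_, chapter, name] =>
          if PySem.Dict.contains bucket chapter then
            PySem.Dict.insert d cat (PySem.Dict.modify bucket chapter [] (fun l => l ++ [name]))
          else
            PySem.Dict.insert d cat (PySem.Dict.insert bucket chapter [name])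
        | _ => d                                                    -- Python: ValueError from unpacking (outside Pre_)

def get_guanqia_alt (guanqia_pic : List (String × Int)) (pic_huodong : List (String × Int)) : List (String × List (String × List String)) :=
  let result := PySem.Dict.ofList (pvMapping.values.map
    (fun v => (v, (PySem.Dict.empty : PySem.Dict String (List String)))))
  ((((PySem.Dict.ofList guanqia_pic).keys ++ (PySem.Dict.ofList pic_huodong).keys).foldl
      pvStepB result).items.map (fun p => (p.1, p.2.items)))

-- ===== PRECONDITION & SPEC =====
-- Pre_ excludes inputs where A raises (KeyError: a surviving key whose prefix is not in the mapping;
-- NameError: a key with ≥ 3 '|' before any 3-part key) and inputs where a surviving key has ≥ 3 '|'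
-- after a 3-part key: there A appends a stale `name` left over from a previous key — an artefact of
-- leftover loop state — while B's tuple unpacking raises ValueError.
def Pre_get_guanqia (guanqia_pic : List (String × Int)) (pic_huodong : List (String × Int)) : Prop :=
  ∀ k ∈ ((PySem.Dict.ofList guanqia_pic).keys ++ (PySem.Dict.ofList pic_huodong).keys).filter
      (fun s => PySem.Str.isIn "|" s && !(PySem.Str.isIn "1-11" s) && !(PySem.Str.isIn "_confirm" s)),
    ((PySem.List.pyGet? ((PySem.Str.split? k "|").getD []) 0).getD "") ∈ (["ZX", "WZ", "PR", "JM", "HD"] : List String) ∧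
    (((PySem.Str.split? k "|").getD []).length = 2 ∨ ((PySem.Str.split? k "|").getD []).length = 3)
instance (guanqia_pic : List (String × Int)) (pic_huodong : List (String × Int)) : Decidable (Pre_get_guanqia guanqia_pic pic_huodong) := by unfold Pre_get_guanqia; infer_instance

def pvWitness_get_guanqia : (List (String × Int)) × (List (String × Int)) :=
  ([("ZX|1-1", 0), ("ZX|1-1|quest", 1), ("hint_confirm", 2)], [("HD|act", 3), ("noline", 4)])

def Spec_get_guanqia (guanqia_pic : List (String × Int)) (pic_huodong : List (String × Int)) (out : List (String × List (String × List String))) : Prop := out = get_guanqia_alt guanqia_pic pic_huodong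
instance (guanqia_pic : List (String × Int)) (pic_huodong : List (String × Int)) (out : List (String × List (String × List String))) : Decidable (Spec_get_guanqia guanqia_pic pic_huodong out) := by unfold Spec_get_guanqia; infer_instance

-- ===== CLAIM (what is proved, stated in full; the proofs are below) =====
def Claim_equal_get_guanqia : Prop := ∀ (guanqia_pic : List (String × Int)) (pic_huodong : List (String × Int)), Dom_get_guanqia guanqia_pic pic_huodong → Pre_get_guanqia guanqia_pic pic_huodong → Spec_get_guanqia guanqia_pic pic_huodong (get_guanqia guanqia_pic pic_huodong)

-- ===== LEMMAS AND PROOFS =====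

-- the keep-predicate of A's filter loop / B's guard
def pvKeep (s : String) : Bool :=
  PySem.Str.isIn "|" s && !(PySem.Str.isIn "1-11" s) && !(PySem.Str.isIn "_confirm" s)

-- the property Pre_ demands of every surviving key
def pvGood (s : String) : Prop :=
  ((PySem.List.pyGet? ((PySem.Str.split? s "|").getD []) 0).getD "") ∈ (["ZX", "WZ", "PR", "JM", "HD"] : List String) ∧
  (((PySem.Str.split? s "|").getD []).length = 2 ∨ ((PySem.Str.split? s "|").getD []).length = 3)

-- B's loop body without the guard
def pvBodyB (d : PySem.Dict String (PySem.Dict String (List String))) (key : String) :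
    PySem.Dict String (PySem.Dict String (List String)) :=
  let parts := (PySem.Str.split? key "|").getD []
  match PySem.Dict.get? pvMapping ((PySem.List.pyGet? parts 0).getD "") with
  | none => d
  | some cat =>
    let bucket := (PySem.Dict.get? d cat).getD PySem.Dict.empty
    if parts.length == 2 then
      PySem.Dict.insert d cat
        (PySem.Dict.setdefault bucket ((PySem.List.pyGet? parts 1).getD "") [])
    else
      match parts with
      | [_, chapter, name] =>
        if PySem.Dict.contains bucket chapter then
          PySem.Dict.insert d cat (PySem.Dict.modify bucket chapter [] (fun l => l ++ [name]))
        else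
          PySem.Dict.insert d cat (PySem.Dict.insert bucket chapter [name])
      | _ => d

theorem pvStepB_eq (d : PySem.Dict String (PySem.Dict String (List String))) (key : String) :
    pvStepB d key = if pvKeep key then pvBodyB d key else d := by
  unfold pvStepB pvBodyB pvKeep
  by_cases h1 : PySem.Str.isIn "|" key <;> by_cases h2 : PySem.Str.isIn "1-11" key <;>
    by_cases h3 : PySem.Str.isIn "_confirm" key <;> simp only [h1, h2, h3] <;> simp

theorem pvRemove_append (kept rs : List String) (r : String) (h : r ∉ kept) :
    PySem.List.remove? (kept ++ r :: rs) r = some (kept ++ rs) := by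
  induction kept with
  | nil => simp [PySem.List.remove?_cons_self]
  | cons a t ih =>
    simp only [List.mem_cons, not_or] at h
    rw [List.cons_append, PySem.List.remove?_cons_of_ne _ (Ne.symm h.1), ih h.2]
    rfl

theorem pvFilterLoop_eq (rest kept : List String) (h : ∀ x ∈ kept, pvKeep x = true) :
    pvFilterLoop rest.length (kept ++ rest) (kept.length : Int) = kept ++ rest.filter pvKeep := by
  induction rest generalizing kept with
  | nil => simp [pvFilterLoop]
  | cons r rs ih =>
    have hget : PySem.List.pyGet? (kept ++ r :: rs) (kept.length : Int) = some r := by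
      rw [PySem.List.pyGet?_natCast, List.getElem?_append_right (le_refl _)]
      simp
    have hnm : ∀ hkr : pvKeep r = false, r ∉ kept := by
      intro hkr hm
      rw [h r hm] at hkr
      exact Bool.true_eq_false.mp hkr
    simp only [List.length_cons, pvFilterLoop, hget, Option.getD_some]
    by_cases h1 : PySem.Str.isIn "|" r
    · by_cases h2 : (PySem.Str.isIn "1-11" r || PySem.Str.isIn "_confirm" r) = true
      · have hkr : pvKeep r = false := by
          unfold pvKeep
          rcases Bool.or_eq_true_iff.mp h2 with h2' | h2' <;>
            simp only [h1, h2', Bool.not_true, Bool.and_false, Bool.false_and]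
        rw [if_pos h1, if_pos h2, pvRemove_append kept rs r (hnm hkr), Option.getD_some,
          show (kept.length : Int) - 1 + 1 = (kept.length : Int) by omega, ih kept h,
          List.filter_cons_of_neg (by simp [hkr])]
      · have hkr : pvKeep r = true := by
          unfold pvKeep
          simp only [Bool.or_eq_true_iff, not_or, Bool.not_eq_true] at h2
          simp only [h1, h2.1, h2.2, Bool.not_false, Bool.and_true]
        have h' : ∀ x ∈ kept ++ [r], pvKeep x = true := by
          intro x hx
          rcases List.mem_append.mp hx with hx | hx
          · exact h x hx
          · simp only [List.mem_singleton] at hx; exact hx ▸ hkr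
        rw [if_pos h1, if_neg h2,
          show (kept.length : Int) + 1 = ((kept ++ [r]).length : Int) by simp,
          show kept ++ r :: rs = (kept ++ [r]) ++ rs by simp,
          ih (kept ++ [r]) h', List.filter_cons_of_pos hkr]
        simp
    · have hkr : pvKeep r = false := by
        unfold pvKeep
        simp only [Bool.not_eq_true] at h1
        simp only [h1, Bool.false_and]
      rw [if_neg h1, pvRemove_append kept rs r (hnm hkr), Option.getD_some,
        show (kept.length : Int) - 1 + 1 = (kept.length : Int) by omega, ih kept h,
        List.filter_cons_of_neg (by simp [hkr])]

theorem pvMapReplace {ν : Type} (l : List (String × ν)) (k : String) (v : ν)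
    (hnd : (l.map Prod.fst).Nodup) (hv : (PySem.Dict.mk l).get? k = some v) :
    l.map (fun p => if p.1 == k then (k, v) else p) = l := by
  induction l with
  | nil => simp [PySem.Dict.get?] at hv
  | cons p t ih =>
    obtain ⟨a, b⟩ := p
    rw [PySem.Dict.get?_mk_cons] at hv
    simp only [List.map_cons, List.nodup_cons] at hnd
    by_cases hb : (a == k) = true
    · rw [if_pos hb] at hv
      have ha : a = k := beq_iff_eq.mp hb
      have hbv : b = v := Option.some.inj hv
      have hmap : ∀ q ∈ t, (fun p => if p.1 == k then (k, v) else p) q = q := by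
        intro q hq
        have hne : q.1 ≠ k := by
          intro e
          exact hnd.1 (ha ▸ e ▸ List.mem_map_of_mem (f := Prod.fst) hq)
        simp [beq_eq_false_iff_ne.mpr hne]
      simp only [List.map_cons, ha, hbv, List.cons.injEq]
      refine ⟨by simp, ?_⟩
      calc t.map _ = t.map id := List.map_congr_left hmap
        _ = t := List.map_id t
    · rw [if_neg hb] at hv
      simp only [List.map_cons, if_neg hb, List.cons.injEq, true_and]
      exact ih hnd.2 hv

theorem pvInsert_self {ν : Type} (d : PySem.Dict String ν) (k : String) (v : ν)
    (hnd : d.keys.Nodup) (hv : d.get? k = some v) : d.insert k v = d := by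
  apply PySem.Dict.ext
  rw [PySem.Dict.items_insert_of_contains d v
    (by rw [PySem.Dict.contains_eq_isSome_get?, hv]; rfl)]
  obtain ⟨items⟩ := d
  simp only [PySem.Dict.keys_mk] at hnd
  exact pvMapReplace items k v (by simpa using hnd) hv

theorem pvCat_facts (a cat : String) (hmem : a ∈ (["ZX", "WZ", "PR", "JM", "HD"] : List String))
    (h : ChapterETC a = some cat) :
    cat ∈ (["主线", "物资筹备", "芯片获取", "剿灭作战", "活动"] : List String) := by
  simp only [List.mem_cons, List.not_mem_nil, or_false] at hmem
  rcases hmem with rfl | rfl | rfl | rfl | rfl <;>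
    · rw [show ChapterETC _ = some _ from rfl] at h
      simp [← Option.some.inj h]

theorem pvStep_agree (d : PySem.Dict String (PySem.Dict String (List String)))
    (name : Option String) (x : String) (rest : List String) (hg : pvGood x)
    (hk : d.keys = ["主线", "物资筹备", "芯片获取", "剿灭作战", "活动"]) :
    (pvLoopA (x :: rest) d name = pvLoopA rest (pvBodyB d x)
      (if ((PySem.Str.split? x "|").getD []).length == 3 then PySem.List.pyGet? ((PySem.Str.split? x "|").getD []) 2 else name)) ∧
    (pvBodyB d x).keys = ["主线", "物资筹备", "芯片获取", "剿灭作战", "活动"] := by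
  obtain ⟨hmem, hlen⟩ := hg
  rcases hlen with h2 | h3
  · -- the key splits into [a, b]
    obtain ⟨a, b, hab⟩ := List.length_eq_two.mp h2
    rw [hab] at hmem
    simp only [show PySem.List.pyGet? [a, b] 0 = some a by
      simp [PySem.List.pyGet?, PySem.List.pyIdx?], Option.getD_some] at hmem
    have hsome : (ChapterETC a).isSome := by
      simp only [List.mem_cons, List.not_mem_nil, or_false] at hmem
      rcases hmem with rfl | rfl | rfl | rfl | rfl <;> decide
    obtain ⟨cat, hcat⟩ := Option.isSome_iff_exists.mp hsome
    have hcatmem : cat ∈ d.keys := by rw [hk]; exact pvCat_facts a cat hmem hcat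
    have hcont : d.contains cat = true := (PySem.Dict.contains_iff_mem_keys d cat).mpr hcatmem
    have hcat' : PySem.Dict.get? pvMapping a = some cat := hcat
    have hwS : (d.get? cat).isSome := by
      rw [← PySem.Dict.contains_eq_isSome_get?]; exact hcont
    obtain ⟨w, hw⟩ := Option.isSome_iff_exists.mp hwS
    simp only [pvLoopA, pvBodyB, hab, hcat, hcat', hw, Option.getD_some,
      show PySem.List.pyGet? [a, b] 0 = some a by simp [PySem.List.pyGet?, PySem.List.pyIdx?],
      show PySem.List.pyGet? [a, b] 1 = some b by simp [PySem.List.pyGet?, PySem.List.pyIdx?],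
      List.length_cons, List.length_nil]
    norm_num
    by_cases hc : PySem.Dict.contains w b
    · rw [if_pos hc, PySem.Dict.setdefault_of_contains w [] hc,
        pvInsert_self d cat w (by rw [hk]; decide) hw]
      exact ⟨rfl, hk⟩
    · rw [if_neg (by simp [hc]), PySem.Dict.setdefault_of_not_contains w [] (by simp [hc])]
      exact ⟨rfl, by rw [PySem.Dict.keys_insert_of_contains d _ hcont]; exact hk⟩
  · -- the key splits into [a, b, c]
    obtain ⟨a, b, c, habc⟩ := List.length_eq_three.mp h3
    rw [habc] at hmem
    simp only [show PySem.List.pyGet? [a, b, c] 0 = some a by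
      simp [PySem.List.pyGet?, PySem.List.pyIdx?], Option.getD_some] at hmem
    have hsome : (ChapterETC a).isSome := by
      simp only [List.mem_cons, List.not_mem_nil, or_false] at hmem
      rcases hmem with rfl | rfl | rfl | rfl | rfl <;> decide
    obtain ⟨cat, hcat⟩ := Option.isSome_iff_exists.mp hsome
    have hcatmem : cat ∈ d.keys := by rw [hk]; exact pvCat_facts a cat hmem hcat
    have hcont : d.contains cat = true := (PySem.Dict.contains_iff_mem_keys d cat).mpr hcatmem
    have hcat' : PySem.Dict.get? pvMapping a = some cat := hcat
    simp only [pvLoopA, pvBodyB, habc, hcat, hcat', Option.getD_some,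
      show PySem.List.pyGet? [a, b, c] 0 = some a by simp [PySem.List.pyGet?, PySem.List.pyIdx?],
      show PySem.List.pyGet? [a, b, c] 1 = some b by simp [PySem.List.pyGet?, PySem.List.pyIdx?],
      show PySem.List.pyGet? [a, b, c] 2 = some c by simp [PySem.List.pyGet?, PySem.List.pyIdx?],
      List.length_cons, List.length_nil]
    norm_num
    by_cases hc : PySem.Dict.contains ((d.get? cat).getD PySem.Dict.empty) b
    · rw [if_pos hc, if_pos hc]
      exact ⟨rfl, by rw [PySem.Dict.keys_insert_of_contains d _ hcont]; exact hk⟩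
    · rw [if_neg hc, if_neg hc]
      exact ⟨rfl, by rw [PySem.Dict.keys_insert_of_contains d _ hcont]; exact hk⟩

theorem pvLoopA_eq (l : List String) (d : PySem.Dict String (PySem.Dict String (List String)))
    (name : Option String) (hg : ∀ x ∈ l, pvGood x)
    (hk : d.keys = ["主线", "物资筹备", "芯片获取", "剿灭作战", "活动"]) :
    pvLoopA l d name = l.foldl pvBodyB d := by
  induction l generalizing d name with
  | nil => rfl
  | cons x rest ih =>
    obtain ⟨hstep, hkeys⟩ := pvStep_agree d name x rest (hg x (List.mem_cons_self)) hk
    rw [hstep, List.foldl_cons]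
    exact ih (pvBodyB d x) _ (fun y hy => hg y (List.mem_cons_of_mem x hy)) hkeys

-- ===== VERDICT (by name: the statement is the Claim_ definition above) =====
theorem get_guanqia_spec : Claim_equal_get_guanqia := by
  intro g h _ hpre
  unfold Spec_get_guanqia get_guanqia get_guanqia_alt
  dsimp only
  have hfilter : pvFilterLoop ((PySem.Dict.ofList g).keys ++ (PySem.Dict.ofList h).keys).length
      ((PySem.Dict.ofList g).keys ++ (PySem.Dict.ofList h).keys) 0
      = ((PySem.Dict.ofList g).keys ++ (PySem.Dict.ofList h).keys).filter pvKeep := by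
    have := pvFilterLoop_eq ((PySem.Dict.ofList g).keys ++ (PySem.Dict.ofList h).keys) []
      (by intro x hx; cases hx)
    simpa using this
  have hgoods : ∀ x ∈ ((PySem.Dict.ofList g).keys ++ (PySem.Dict.ofList h).keys).filter pvKeep,
      pvGood x := fun x hx => hpre x hx
  have hinit : PySem.Dict.ofList (pvMapping.values.map
      (fun v => (v, (PySem.Dict.empty : PySem.Dict String (List String))))) = pvInitA := by rfl
  have hkeys : pvInitA.keys = ["主线", "物资筹备", "芯片获取", "剿灭作战", "活动"] := by rfl
  rw [hfilter, pvLoopA_eq _ _ _ hgoods hkeys, hinit,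
    show pvStepB = fun d x => if pvKeep x then pvBodyB d x else d from
      funext fun d => funext fun x => pvStepB_eq d x,
    ← List.foldl_filter]
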